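-- pv_equiv track=rewrite | github.com/anbinumer/acevalidation-handoff | auth/auth_manager.py | _determine_user_role
-- ===== SOURCE A (Python) =====
-- def _determine_user_role(user_data):
--     """Determine user role for RTO context based on job title or department"""
--     job_title = (user_data.get('jobTitle') or '').lower()
--     department = (user_data.get('department') or '').lower()
--
--     # RTO-specific role mapping
--     if any(keyword in job_title for keyword in ['admin', 'administrator', 'ceo', 'president']):
--         return 'Admin'
--     elif any(keyword in job_title for keyword in ['trainer', 'assessor', 'teacher', 'educator']):
--         return 'Assessor'
--     elif any(keyword in job_title for keyword in ['manager', 'director', 'head', 'lead']):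
--         return 'Manager'
--     elif any(keyword in job_title for keyword in ['compliance', 'quality', 'audit']):
--         return 'Compliance Officer'
--     elif any(keyword in department for keyword in ['training', 'education', 'vet']):
--         return 'Training Staff'
--     else:
--         return 'Validator'  # Default role
-- ===== SOURCE B (Python) =====
-- def _determine_user_role(user_data):
--     """Determine user role for RTO context based on job title or department"""
--     job_title = (user_data.get('jobTitle') or '').lower()
--     department = (user_data.get('department') or '').lower()
--
--     role_of = {
--         'admin': 'Admin', 'administrator': 'Admin', 'ceo': 'Admin', 'president': 'Admin',
--         'trainer': 'Assessor', 'assessor': 'Assessor', 'teacher': 'Assessor', 'educator': 'Assessor',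
--         'manager': 'Manager', 'director': 'Manager', 'head': 'Manager', 'lead': 'Manager',
--         'compliance': 'Compliance Officer', 'quality': 'Compliance Officer', 'audit': 'Compliance Officer',
--         'training': 'Training Staff', 'education': 'Training Staff', 'vet': 'Training Staff',
--     }
--     department_keywords = {'training', 'education', 'vet'}
--
--     matched_roles = {role for keyword, role in role_of.items()
--                      if keyword in (department if keyword in department_keywords else job_title)}
--
--     for role in ('Admin', 'Assessor', 'Manager', 'Compliance Officer', 'Training Staff'):
--         if role in matched_roles:
--             return role
--     return 'Validator'
-- ===== Notes on version B (the rewrite author's own statement) =====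
-- stated objective: alternative
-- what changed: Replaces the five-branch if/elif chain of any() tests with an inverted keyword-to-role dictionary: one comprehension pass collects the set of all matched roles (each keyword checked against its bound field), then a fixed priority order picks the first matched role, defaulting to 'Validator'.
import Mathlib
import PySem

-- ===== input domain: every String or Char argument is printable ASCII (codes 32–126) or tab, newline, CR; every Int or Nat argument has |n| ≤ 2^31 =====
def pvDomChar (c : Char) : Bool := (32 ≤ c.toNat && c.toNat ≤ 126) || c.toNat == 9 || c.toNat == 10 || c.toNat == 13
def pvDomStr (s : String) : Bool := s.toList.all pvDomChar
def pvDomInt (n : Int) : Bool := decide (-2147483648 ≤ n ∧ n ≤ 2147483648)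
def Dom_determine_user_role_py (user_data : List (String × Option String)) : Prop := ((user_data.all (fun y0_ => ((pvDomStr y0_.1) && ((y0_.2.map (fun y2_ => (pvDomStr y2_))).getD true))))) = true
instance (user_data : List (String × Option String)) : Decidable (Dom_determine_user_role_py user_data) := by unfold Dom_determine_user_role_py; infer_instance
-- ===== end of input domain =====

-- B replaces A's if/elif chain by: a keyword→role map, a set of roles matched in one comprehension pass, then a priority pick (alternative decomposition; same cost).


-- ===== PORT A =====
-- (user_data.get(k) or '').lower() — get? yields Option (Option String); `or ''` coalesces missing/None (and '') to ''
def determine_user_role_py (user_data : List (String × Option String)) : String :=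
  let job_title := PySem.Str.lower ((((PySem.Dict.mk user_data).get? "jobTitle").getD none).getD "")
  let department := PySem.Str.lower ((((PySem.Dict.mk user_data).get? "department").getD none).getD "")
  if ["admin", "administrator", "ceo", "president"].any (fun k => PySem.Str.isIn k job_title) then "Admin"
  else if ["trainer", "assessor", "teacher", "educator"].any (fun k => PySem.Str.isIn k job_title) then "Assessor"
  else if ["manager", "director", "head", "lead"].any (fun k => PySem.Str.isIn k job_title) then "Manager"
  else if ["compliance", "quality", "audit"].any (fun k => PySem.Str.isIn k job_title) then "Compliance Officer"
  else if ["training", "education", "vet"].any (fun k => PySem.Str.isIn k department) then "Training Staff"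
  else "Validator"

-- ===== PORT B =====
-- role_of dict: keyword → role, in Source B's insertion order (iterated as items, in order)
def pvRoleOf : List (String × String) :=
  [("admin", "Admin"), ("administrator", "Admin"), ("ceo", "Admin"), ("president", "Admin"),
   ("trainer", "Assessor"), ("assessor", "Assessor"), ("teacher", "Assessor"), ("educator", "Assessor"),
   ("manager", "Manager"), ("director", "Manager"), ("head", "Manager"), ("lead", "Manager"),
   ("compliance", "Compliance Officer"), ("quality", "Compliance Officer"), ("audit", "Compliance Officer"),
   ("training", "Training Staff"), ("education", "Training Staff"), ("vet", "Training Staff")]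

def pvDeptKeywords : PySem.Set String := PySem.Set.ofList ["training", "education", "vet"]

-- the set comprehension: roles of keywords found in their bound field
def pvMatchedRoles (job_title department : String) : PySem.Set String :=
  PySem.Set.ofList (pvRoleOf.filterMap (fun kr =>
    if PySem.Str.isIn kr.1 (if PySem.Set.contains pvDeptKeywords kr.1 then department else job_title)
    then some kr.2 else none))

-- the final for-loop: first role of the priority tuple present in the matched set
def pvPickRole (matched : PySem.Set String) : List String → String
  | [] => "Validator"
  | r :: rest => if PySem.Set.contains matched r then r else pvPickRole matched rest

def determine_user_role_py_alt (user_data : List (String × Option String)) : String :=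
  let job_title := PySem.Str.lower ((((PySem.Dict.mk user_data).get? "jobTitle").getD none).getD "")
  let department := PySem.Str.lower ((((PySem.Dict.mk user_data).get? "department").getD none).getD "")
  pvPickRole (pvMatchedRoles job_title department)
    ["Admin", "Assessor", "Manager", "Compliance Officer", "Training Staff"]

-- ===== PRECONDITION & SPEC =====
def Spec_determine_user_role_py (user_data : List (String × Option String)) (out : String) : Prop := out = determine_user_role_py_alt user_data
instance (user_data : List (String × Option String)) (out : String) : Decidable (Spec_determine_user_role_py user_data out) := by unfold Spec_determine_user_role_py; infer_instance

-- ===== CLAIM (what is proved, stated in full; the proofs are below) =====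
def Claim_equal_determine_user_role_py : Prop := ∀ (user_data : List (String × Option String)), Dom_determine_user_role_py user_data → Spec_determine_user_role_py user_data (determine_user_role_py user_data)

-- ===== LEMMAS AND PROOFS =====

-- each role is in the matched set exactly when one of its keywords occurs in its bound field
lemma pvContains_matched (jt dp r : String) :
    PySem.Set.contains (pvMatchedRoles jt dp) r =
      (pvRoleOf.any (fun kr => kr.2 == r &&
        PySem.Str.isIn kr.1 (if PySem.Set.contains pvDeptKeywords kr.1 then dp else jt))) := by
  rw [Bool.eq_iff_iff]
  simp [pvMatchedRoles, PySem.Set.contains_eq_listContains,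
        PySem.Set.mem_ofList, List.mem_filterMap, List.any_eq_true]

-- ===== VERDICT (by name: the statement is the Claim_ definition above) =====
theorem determine_user_role_py_spec : Claim_equal_determine_user_role_py := by
  intro u _
  unfold Spec_determine_user_role_py determine_user_role_py determine_user_role_py_alt
  simp only [pvPickRole, pvContains_matched]
  simp [pvRoleOf, pvDeptKeywords, List.any_cons]
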